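-- pv_equiv track=rewrite | github.com/ItsGoldeneyes/BattleSnake | golden/src/algorithms/minimax.py | dict_next_key
-- ===== SOURCE A (Python) =====
-- def dict_next_key(dictionary, key):
--     '''
--     Taken from https://www.geeksforgeeks.org/python-get-next-key-in-dictionary/
--     '''
--     # prepare additional dictionaries
--     ki = dict()
--     ik = dict()
--     for i, k in enumerate(dictionary):
--         ki[k] = i   # dictionary index_of_key
--         ik[i] = k   # dictionary key_of_index
--
--     # initializing offset
--     offset = 1  # (1 for next key, but can be any existing distance)
--
--     # Get next key in Dictionary
--     index_of_key = ki[key]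
--     index_of_next_key = (index_of_key + offset) % len(dictionary)
--     result = ik[index_of_next_key] if index_of_next_key in ik else None
--
--     return result
-- ===== SOURCE B (Python) =====
-- def dict_next_key(dictionary, key):
--     it = iter(dictionary)
--     try:
--         first = next(it)
--     except StopIteration:
--         raise KeyError(key)
--     prev_matched = (first == key)
--     for k in it:
--         if prev_matched:
--             return k
--         prev_matched = (k == key)
--     if prev_matched:
--         return first
--     raise KeyError(key)
-- ===== Notes on version B (the rewrite author's own statement) =====
-- stated objective: simpler
-- what changed: B makes one stateful pass over the keys with a remembered first key and a previous-iteration-matched flag (early exit), instead of building two auxiliary index dictionaries and computing a modular index.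
import Mathlib
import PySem

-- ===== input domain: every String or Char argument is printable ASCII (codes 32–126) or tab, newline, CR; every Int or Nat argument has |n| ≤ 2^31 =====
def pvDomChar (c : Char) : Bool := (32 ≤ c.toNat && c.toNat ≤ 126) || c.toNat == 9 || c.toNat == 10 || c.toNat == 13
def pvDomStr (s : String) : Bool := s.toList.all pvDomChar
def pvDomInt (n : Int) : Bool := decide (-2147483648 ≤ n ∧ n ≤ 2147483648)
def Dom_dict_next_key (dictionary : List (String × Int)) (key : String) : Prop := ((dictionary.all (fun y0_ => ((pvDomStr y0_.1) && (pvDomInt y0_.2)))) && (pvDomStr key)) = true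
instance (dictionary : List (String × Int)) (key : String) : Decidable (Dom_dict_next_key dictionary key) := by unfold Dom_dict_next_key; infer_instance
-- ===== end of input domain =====

-- B replaces A's two auxiliary index dictionaries and modular arithmetic by one stateful pass
-- over the keys (remembered first key + previous-iteration-matched flag); objective: simpler.


-- ===== PORT A =====
-- the dict argument is an assoc list; its iteration (keys) order is first occurrences of keys
def dict_next_key (dictionary : List (String × Int)) (key : String) : Option String :=
  let keys := PySem.List.dedup (dictionary.map Prod.fst)
  -- ki[k] = i ; ik[i] = k   for i, k in enumerate(dictionary)
  let ki : PySem.Dict String Int :=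
    (PySem.List.enumerate keys 0).foldl (fun d p => d.insert p.2 p.1) PySem.Dict.empty
  let ik : PySem.Dict Int String :=
    (PySem.List.enumerate keys 0).foldl (fun d p => d.insert p.1 p.2) PySem.Dict.empty
  let offset : Int := 1
  match ki.get? key with
  | none => none                    -- Python raises KeyError here: excluded by Pre_
  | some indexOfKey =>
    match PySem.Int.mod? (indexOfKey + offset) (keys.length : Int) with
    | none => none                  -- ZeroDivisionError (unreachable once ki[key] succeeded)
    | some j => ik.get? j           -- result = ik[j] if j in ik else None

-- ===== PORT B =====
-- the loop of Source B: prev = "previous key equalled `key`"; some k as soon as prev; wrap to first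
def dictNextKeyScan (first : String) (key : String) (prev : Bool) : List String → Option String
  | [] => if prev then some first else none          -- Source B: return first / raise KeyError
  | k :: rest => if prev then some k else dictNextKeyScan first key (k == key) rest

def dict_next_key_alt (dictionary : List (String × Int)) (key : String) : Option String :=
  match PySem.List.dedup (dictionary.map Prod.fst) with
  | [] => none                                        -- Source B: next(it) fails → KeyError
  | k0 :: rest => dictNextKeyScan k0 key (k0 == key) rest

-- ===== PRECONDITION & SPEC =====
-- Pre_ excludes exactly the inputs on which Python A raises KeyError (key absent, incl. empty dict)
def Pre_dict_next_key (dictionary : List (String × Int)) (key : String) : Prop :=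
  key ∈ dictionary.map Prod.fst
instance (dictionary : List (String × Int)) (key : String) : Decidable (Pre_dict_next_key dictionary key) := by unfold Pre_dict_next_key; infer_instance
def pvWitness_dict_next_key : (List (String × Int)) × String := ([("a", 1), ("b", 2)], "b")

def Spec_dict_next_key (dictionary : List (String × Int)) (key : String) (out : Option String) : Prop := out = dict_next_key_alt dictionary key
instance (dictionary : List (String × Int)) (key : String) (out : Option String) : Decidable (Spec_dict_next_key dictionary key out) := by unfold Spec_dict_next_key; infer_instance

-- ===== CLAIM (what is proved, stated in full; the proofs are below) =====
def Claim_equal_dict_next_key : Prop := ∀ (dictionary : List (String × Int)) (key : String), Dom_dict_next_key dictionary key → Pre_dict_next_key dictionary key → Spec_dict_next_key dictionary key (dict_next_key dictionary key)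

-- ===== LEMMAS AND PROOFS =====

-- successor-with-wrap of the first occurrence of `key`, the common value of both ports
def nxtH (first key : String) : List String → Option String
  | [] => none
  | k :: t => if k = key then some (t.headD first) else nxtH first key t

theorem dictNextKeyScan_spec (l : List String) (first key : String) (prev : Bool) :
    dictNextKeyScan first key prev l =
      if prev then some (l.headD first) else nxtH first key l := by
  induction l generalizing prev with
  | nil => cases prev <;> simp [dictNextKeyScan, nxtH]
  | cons k t ih =>
    cases prev <;> simp [dictNextKeyScan, ih, nxtH, beq_iff_eq]

theorem nxtH_of_mem (l : List String) (first key : String) (h : key ∈ l) :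
    nxtH first key l = some (l.getD (l.idxOf key + 1) first) := by
  induction l with
  | nil => cases h
  | cons k t ih =>
    by_cases hk : k = key
    · subst hk
      simp [nxtH, List.idxOf_cons_self]
      cases t <;> simp
    · have ht : key ∈ t := by
        rw [List.mem_cons] at h
        rcases h with h | h
        · exact absurd h.symm hk
        · exact h
      have hkk : k ≠ key := hk
      simp only [nxtH, if_neg hk, ih ht]
      rw [List.idxOf_cons_ne _ hkk, Nat.succ_eq_add_one]
      simp

-- ki lookup: the index of x in ks (keys distinct)
theorem get?_ki (ks : List String) (s : Int) (d : PySem.Dict String Int) (x : String)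
    (hnd : ks.Nodup) :
    ((PySem.List.enumerate ks s).foldl (fun d p => d.insert p.2 p.1) d).get? x =
      if x ∈ ks then some (s + ks.idxOf x) else d.get? x := by
  induction ks generalizing s d with
  | nil => simp [PySem.List.enumerate_nil]
  | cons k t ih =>
    rw [PySem.List.enumerate_cons]
    simp only [List.foldl_cons]
    rw [ih _ _ hnd.of_cons]
    by_cases hxt : x ∈ t
    · have hxk : x ≠ k := fun h => ((List.nodup_cons.mp hnd).1 (h ▸ hxt)).elim
      have hkx : k ≠ x := fun h => hxk h.symm
      rw [if_pos hxt, if_pos (List.mem_cons.mpr (Or.inr hxt)),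
        List.idxOf_cons_ne _ hkx, Nat.succ_eq_add_one]
      congr 1
      push_cast
      ring
    · simp only [hxt, if_false]
      by_cases hxk : x = k
      · subst hxk
        simp [PySem.Dict.get?_insert_self, List.idxOf_cons_self]
      · rw [if_neg (by simp [hxt, hxk]), PySem.Dict.get?_insert_of_ne _ _ hxk]

-- ik lookup: the element of ks at Int index j (enumerate indices are distinct)
theorem get?_ik (ks : List String) (s : Int) (d : PySem.Dict Int String) (j : Int) :
    ((PySem.List.enumerate ks s).foldl (fun d p => d.insert p.1 p.2) d).get? j =
      if s ≤ j ∧ j < s + ks.length then ks[(j - s).toNat]? else d.get? j := by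
  induction ks generalizing s d with
  | nil =>
    simp only [PySem.List.enumerate_nil, List.foldl_nil, List.length_nil]
    rw [if_neg (by omega)]
  | cons k t ih =>
    rw [PySem.List.enumerate_cons]
    simp only [List.foldl_cons]
    rw [ih (s + 1) _]
    by_cases h1 : s + 1 ≤ j ∧ j < s + 1 + t.length
    · rw [if_pos h1, if_pos (by simp; omega)]
      have h2 : (j - s).toNat = (j - (s + 1)).toNat + 1 := by omega
      simp [h2]
    · rw [if_neg h1]
      by_cases hj : j = s
      · subst hj
        rw [PySem.Dict.get?_insert_self,
          if_pos (And.intro (le_refl _) (by simp only [List.length_cons]; push_cast; omega))]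
        simp
      · rw [PySem.Dict.get?_insert_of_ne _ _ hj, if_neg (by simp at h1 ⊢; omega)]

-- ===== VERDICT (by name: the statement is the Claim_ definition above) =====
theorem dict_next_key_spec : Claim_equal_dict_next_key := by
  intro dictionary key _hdom hpre
  unfold Spec_dict_next_key dict_next_key dict_next_key_alt
  set ks := PySem.List.dedup (dictionary.map Prod.fst) with hks
  have hmem : key ∈ ks := by
    rw [hks, PySem.List.mem_dedup]; exact hpre
  have hnd : ks.Nodup := by rw [hks]; exact PySem.List.nodup_dedup _
  have hlen : 0 < ks.length := List.length_pos_of_mem hmem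
  set i := List.idxOf key ks with hi
  have hidx : i < ks.length := List.idxOf_lt_length_of_mem hmem
  have hm : (i + 1) % ks.length < ks.length := Nat.mod_lt _ hlen
  have hki : ((PySem.List.enumerate ks 0).foldl
      (fun d p => d.insert p.2 p.1) PySem.Dict.empty).get? key = some ((0 : Int) + ↑i) := by
    rw [get?_ki ks 0 _ key hnd, if_pos hmem]
  have hmod : PySem.Int.mod? ((0 : Int) + ↑i + 1) (↑ks.length) =
      some (↑((i + 1) % ks.length)) := by
    rw [PySem.Int.mod?, if_neg (by omega : (ks.length : Int) ≠ 0),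
      show (0 : Int) + ↑i + 1 = ((i + 1 : Nat) : Int) by push_cast; ring]
    congr 1
  have hik : ((PySem.List.enumerate ks 0).foldl
      (fun d p => d.insert p.1 p.2) PySem.Dict.empty).get? (↑((i + 1) % ks.length)) =
      ks[(i + 1) % ks.length]? := by
    rw [get?_ik ks 0 _ _, if_pos ⟨by omega, by omega⟩]
    congr 1
  simp only [hki, hmod, hik]
  obtain ⟨k0, t, hcons⟩ : ∃ k0 t, ks = k0 :: t := by
    cases hksv : ks with
    | nil => rw [hksv] at hlen; simp at hlen
    | cons a b => exact ⟨a, b, rfl⟩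
  simp only [hcons, dictNextKeyScan_spec]
  by_cases hk0 : k0 = key
  · simp only [hk0, beq_self_eq_true, if_true]
    have hi0 : i = 0 := by rw [hi, hcons, hk0]; exact List.idxOf_cons_self
    rw [hi0]
    cases t <;> simp
  · have hkt : key ∈ t := by
      rw [hcons, List.mem_cons] at hmem
      rcases hmem with h | h
      · exact absurd h.symm hk0
      · exact h
    rw [if_neg (by simp [hk0]), nxtH_of_mem _ _ _ hkt]
    have hi1 : i = List.idxOf key t + 1 := by
      rw [hi, hcons, List.idxOf_cons_ne _ (by exact hk0), Nat.succ_eq_add_one]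
    have hmt : List.idxOf key t < t.length := List.idxOf_lt_length_of_mem hkt
    rw [hi1]
    by_cases hw : List.idxOf key t + 1 < t.length
    · have h2 : (List.idxOf key t + 1 + 1) % (k0 :: t).length = List.idxOf key t + 1 + 1 := by
        rw [List.length_cons]; exact Nat.mod_eq_of_lt (by omega)
      rw [h2, List.getElem?_cons_succ, List.getElem?_eq_getElem hw,
        List.getD_eq_getElem _ _ hw]
    · have heq : List.idxOf key t + 1 = t.length := by omega
      have h2 : (List.idxOf key t + 1 + 1) % (k0 :: t).length = 0 := by
        rw [List.length_cons, show List.idxOf key t + 1 + 1 = t.length + 1 by omega]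
        exact Nat.mod_self _
      rw [h2, List.getD_eq_default _ _ (by omega)]
      simp
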